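-- pv_equiv track=rewrite | github.com/MichaelCrowe11/synapse-lang | synapse_licensing.py | validate_license_key
-- ===== SOURCE A (Python) =====
-- def validate_license_key(license_key: str) -> bool:
--     """Validate a license key format"""
--     # Format: XXXX-XXXX-XXXX-XXXX-XXXX
--     parts = license_key.split("-")
--     if len(parts) != 5:
--         return False
--
--     for part in parts:
--         if len(part) != 4 or not part.isalnum():
--             return False
--
--     return True
-- ===== SOURCE B (Python) =====
-- def validate_license_key(license_key: str) -> bool:
--     """Validate a license key format (positional scan, no splitting)."""
--     if len(license_key) != 24:
--         return False
--     for i, ch in enumerate(license_key):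
--         if i in (4, 9, 14, 19):
--             if ch != "-":
--                 return False
--         elif not ch.isalnum():
--             return False
--     return True
-- ===== Notes on version B (the rewrite author's own statement) =====
-- stated objective: alternative
-- what changed: B drops the split entirely: it checks that the length is 24 and scans characters by position (separator required at indices 4, 9, 14 and 19, alphanumeric elsewhere), instead of building the list of separator-delimited parts and validating each part.
import Mathlib
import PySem

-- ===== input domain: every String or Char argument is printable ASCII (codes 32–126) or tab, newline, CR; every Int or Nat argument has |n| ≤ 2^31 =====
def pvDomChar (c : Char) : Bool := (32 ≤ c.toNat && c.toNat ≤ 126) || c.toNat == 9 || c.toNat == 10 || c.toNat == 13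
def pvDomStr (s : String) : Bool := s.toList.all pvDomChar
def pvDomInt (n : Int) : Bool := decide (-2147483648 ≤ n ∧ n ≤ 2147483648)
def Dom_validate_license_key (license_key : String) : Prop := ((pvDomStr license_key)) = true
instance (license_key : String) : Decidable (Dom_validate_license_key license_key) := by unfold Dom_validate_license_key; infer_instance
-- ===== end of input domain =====

-- B replaces A's split-into-parts check by a single positional scan of the 24 characters.

-- ===== PORT A =====
-- for part in parts: if len(part) != 4 or not part.isalnum(): return False
def vlkPartsLoop : List (List Char) → Bool
  | [] => true
  | p :: rest =>
    if p.length != 4 || !(PySem.Chars.strIsalnum p) then false else vlkPartsLoop rest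

def validate_license_key (license_key : String) : Bool :=
  let parts := PySem.Chars.splitOn license_key.toList ['-']
  if parts.length ≠ 5 then false
  else vlkPartsLoop parts

-- ===== PORT B =====
-- for i, ch in enumerate(license_key): …
def vlkScanLoop : Nat → List Char → Bool
  | _, [] => true
  | i, c :: rest =>
    if i = 4 ∨ i = 9 ∨ i = 14 ∨ i = 19 then
      if c ≠ '-' then false else vlkScanLoop (i + 1) rest
    else if !(PySem.Chars.isalnum c) then false
    else vlkScanLoop (i + 1) rest

def validate_license_key_alt (license_key : String) : Bool :=
  if license_key.toList.length ≠ 24 then false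
  else vlkScanLoop 0 license_key.toList

-- ===== PRECONDITION & SPEC =====
def Spec_validate_license_key (license_key : String) (out : Bool) : Prop := out = validate_license_key_alt license_key
instance (license_key : String) (out : Bool) : Decidable (Spec_validate_license_key license_key out) := by unfold Spec_validate_license_key; infer_instance

-- ===== CLAIM (what is proved, stated in full; the proofs are below) =====
def Claim_equal_validate_license_key : Prop := ∀ (license_key : String), Dom_validate_license_key license_key → Spec_validate_license_key license_key (validate_license_key license_key)

-- ===== LEMMAS AND PROOFS =====

-- structured split into (first part, remaining parts)
def msp : List Char → List Char × List (List Char)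
  | [] => ([], [])
  | c :: cs =>
    if c = '-' then ([], (msp cs).1 :: (msp cs).2)
    else (c :: (msp cs).1, (msp cs).2)

-- canonical scanner: p completed parts, n chars seen in current part
def scan (p n : Nat) : List Char → Bool
  | [] => p == 4 && n == 4
  | c :: cs =>
    if c = '-' then n == 4 && scan (p + 1) 0 cs
    else PySem.Chars.isalnum c && scan p (n + 1) cs

theorem splitOn_go_eq : ∀ (fuel : Nat) (l cur : List Char) (acc : List (List Char)),
    l.length ≤ fuel →
    PySem.Chars.splitOn.go ['-'] fuel l cur acc
      = acc.reverse ++ (cur.reverse ++ (msp l).1) :: (msp l).2 := by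
  intro fuel
  induction fuel with
  | zero =>
    intro l cur acc h
    have : l = [] := List.eq_nil_of_length_eq_zero (Nat.le_zero.mp h)
    subst this
    simp [PySem.Chars.splitOn.go, msp]
  | succ fuel ih =>
    intro l cur acc h
    cases l with
    | nil => simp [PySem.Chars.splitOn.go, msp]
    | cons c rest =>
      by_cases hc : c = '-'
      · subst hc
        have hpre : List.isPrefixOf ['-'] ('-' :: rest) = true := by
          simp [List.isPrefixOf]
        rw [show PySem.Chars.splitOn.go ['-'] (fuel+1) ('-' :: rest) cur acc
              = PySem.Chars.splitOn.go ['-'] fuel rest [] (cur.reverse :: acc) by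
            simp [PySem.Chars.splitOn.go, hpre]]
        rw [ih rest [] (cur.reverse :: acc) (by simpa using Nat.lt_succ_iff.mp (by simpa using h))]
        simp [msp]
      · have hpre : List.isPrefixOf ['-'] (c :: rest) = false := by
          simp [List.isPrefixOf]
          intro h'; exact hc h'.symm
        rw [show PySem.Chars.splitOn.go ['-'] (fuel+1) (c :: rest) cur acc
              = PySem.Chars.splitOn.go ['-'] fuel rest (c :: cur) acc by
            simp [PySem.Chars.splitOn.go, hpre]]
        rw [ih rest (c :: cur) acc (by simpa using Nat.lt_succ_iff.mp (by simpa using h))]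
        simp [msp, hc]

theorem splitOn_eq_msp (l : List Char) :
    PySem.Chars.splitOn l ['-'] = (msp l).1 :: (msp l).2 := by
  have := splitOn_go_eq (l.length + 1) l [] [] (Nat.le_succ _)
  simpa [PySem.Chars.splitOn] using this

def goodPart (p : List Char) : Prop := p.length = 4 ∧ p.all PySem.Chars.isalnum = true

theorem vlkPartsLoop_iff (ps : List (List Char)) :
    vlkPartsLoop ps = true ↔ ∀ p ∈ ps, goodPart p := by
  induction ps with
  | nil => simp [vlkPartsLoop]
  | cons p rest ih =>
    have hgood : (p.length != 4 || !(PySem.Chars.strIsalnum p)) = false ↔ goodPart p := by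
      cases p with
      | nil => simp [goodPart, PySem.Chars.strIsalnum]
      | cons a as => simp [goodPart, PySem.Chars.strIsalnum]
    simp only [vlkPartsLoop]
    by_cases hb : (p.length != 4 || !(PySem.Chars.strIsalnum p)) = true
    · rw [if_pos hb]
      simp only [Bool.false_eq_true, false_iff]
      intro h
      have hf := hgood.mpr (h p (List.mem_cons_self))
      rw [hf] at hb
      exact Bool.false_ne_true hb
    · rw [if_neg hb]
      have hg : goodPart p := hgood.mp (Bool.eq_false_iff.mpr hb)
      rw [ih]
      constructor
      · intro h q hq
        rcases List.mem_cons.mp hq with rfl | hq'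
        · exact hg
        · exact h q hq'
      · intro h q hq
        exact h q (List.mem_cons_of_mem _ hq)

theorem scan_iff : ∀ (cs : List Char) (p n : Nat),
    scan p n cs = true ↔
      (p + 1 + (msp cs).2.length = 5 ∧ n + (msp cs).1.length = 4 ∧
       (msp cs).1.all PySem.Chars.isalnum = true ∧ ∀ q ∈ (msp cs).2, goodPart q) := by
  intro cs
  induction cs with
  | nil => intro p n; simp [scan, msp]
  | cons c rest ih =>
    intro p n
    by_cases hc : c = '-'
    · subst hc
      simp only [scan, msp, reduceIte, Bool.and_eq_true, beq_iff_eq, List.length_cons,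
        List.length_nil, List.all_nil]
      rw [ih (p + 1) 0]
      simp only [List.mem_cons, goodPart]
      constructor
      · rintro ⟨hn, h1, h2, h3, h4⟩
        refine ⟨by omega, by omega, trivial, fun q hq => by
          rcases hq with rfl | hq
          · exact ⟨by omega, h3⟩
          · exact h4 q hq⟩
      · rintro ⟨h1, h2, _, h4⟩
        have hh := h4 (msp rest).1 (Or.inl rfl)
        exact ⟨by omega, by omega, by omega, hh.2, fun q hq => h4 q (Or.inr hq)⟩
    · simp only [scan, msp, if_neg hc, Bool.and_eq_true]
      rw [ih p (n + 1)]
      simp only [List.length_cons, List.all_cons, Bool.and_eq_true]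
      constructor
      · rintro ⟨ha, h1, h2, h3, h4⟩
        exact ⟨h1, by omega, ⟨ha, h3⟩, h4⟩
      · rintro ⟨h1, h2, ⟨ha, h3⟩, h4⟩
        exact ⟨ha, h1, by omega, h3, h4⟩

theorem scan_false_of_big_n : ∀ (cs : List Char) (p n : Nat), 5 ≤ n → scan p n cs = false := by
  intro cs
  induction cs with
  | nil => intro p n h; simp [scan]; omega
  | cons c rest ih =>
    intro p n h
    by_cases hc : c = '-'
    · subst hc; simp [scan]; intro h'; omega
    · simp [scan, hc]
      intro _; exact ih p (n + 1) (by omega)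

theorem scan_length : ∀ (cs : List Char) (p n : Nat), scan p n cs = true → 5 * p + n + cs.length = 24 := by
  intro cs
  induction cs with
  | nil => intro p n h; simp [scan] at h; simp; omega
  | cons c rest ih =>
    intro p n h
    by_cases hc : c = '-'
    · subst hc
      simp [scan] at h
      have := ih (p + 1) 0 h.2
      simp; omega
    · simp [scan, hc] at h
      have := ih p (n + 1) h.2
      simp; omega

theorem vlkScanLoop_eq_scan : ∀ (cs : List Char) (p n : Nat),
    n ≤ 4 → p ≤ 4 → cs.length + (5 * p + n) = 24 →
    vlkScanLoop (5 * p + n) cs = scan p n cs := by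
  intro cs
  induction cs with
  | nil => intro p n _ _ h; simp only [List.length_nil] at h; simp [vlkScanLoop, scan]; omega
  | cons c rest ih =>
    intro p n hn hp hlen
    simp only [List.length_cons] at hlen
    by_cases h4 : n = 4
    · subst h4
      have hp3 : p ≤ 3 := by omega
      have hmem : 5 * p + 4 = 4 ∨ 5 * p + 4 = 9 ∨ 5 * p + 4 = 14 ∨ 5 * p + 4 = 19 := by omega
      by_cases hc : c = '-'
      · subst hc
        simp only [vlkScanLoop, if_pos hmem, ne_eq, not_true_eq_false, if_false]
        have : 5 * p + 4 + 1 = 5 * (p + 1) + 0 := by omega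
        rw [show ((5 : Nat) * p + 4 + 1) = 5 * (p + 1) + 0 from by omega]
        rw [ih (p + 1) 0 (by omega) (by omega) (by omega)]
        simp [scan]
      · simp only [vlkScanLoop, if_pos hmem, ne_eq, hc, not_false_eq_true, if_pos]
        simp only [scan, if_neg hc]
        rw [scan_false_of_big_n rest p 5 (by omega)]
        simp
    · have hnmem : ¬ (5 * p + n = 4 ∨ 5 * p + n = 9 ∨ 5 * p + n = 14 ∨ 5 * p + n = 19) := by omega
      by_cases hc : c = '-'
      · subst hc
        simp only [vlkScanLoop, if_neg hnmem]
        have : PySem.Chars.isalnum '-' = false := by decide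
        simp [this, scan, h4]
      · simp only [vlkScanLoop, if_neg hnmem, scan, if_neg hc]
        by_cases ha : PySem.Chars.isalnum c = true
        · simp only [ha, Bool.not_true, Bool.false_eq_true, if_false, Bool.true_and]
          rw [show (5 * p + n + 1) = 5 * p + (n + 1) from by omega]
          exact ih p (n + 1) (by omega) hp (by omega)
        · simp [Bool.not_eq_true] at ha
          simp [ha]

theorem A_iff (s : String) : validate_license_key s = true ↔ scan 0 0 s.toList = true := by
  unfold validate_license_key
  rw [splitOn_eq_msp, scan_iff]
  simp only [List.length_cons]
  by_cases h5 : (msp s.toList).2.length + 1 = 5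
  · rw [if_neg (by omega), vlkPartsLoop_iff]
    simp only [List.mem_cons]
    constructor
    · intro h
      have hh := h (msp s.toList).1 (Or.inl rfl)
      exact ⟨by omega, by simpa [goodPart] using hh.1, hh.2, fun q hq => h q (Or.inr hq)⟩
    · rintro ⟨_, h2, h3, h4⟩
      rintro q (rfl | hq)
      · exact ⟨by omega, h3⟩
      · exact h4 q hq
  · rw [if_pos (by omega)]
    simp only [Bool.false_eq_true, false_iff]
    rintro ⟨h, _⟩; omega

theorem B_iff (s : String) : validate_license_key_alt s = true ↔ scan 0 0 s.toList = true := by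
  unfold validate_license_key_alt
  by_cases hl : s.toList.length = 24
  · rw [if_neg (by omega)]
    have := vlkScanLoop_eq_scan s.toList 0 0 (by omega) (by omega) (by omega)
    simpa using this
  · rw [if_pos (by omega)]
    simp only [Bool.false_eq_true, false_iff]
    intro h
    exact hl (by have := scan_length s.toList 0 0 h; omega)

-- ===== VERDICT (by name: the statement is the Claim_ definition above) =====
theorem validate_license_key_spec : Claim_equal_validate_license_key := by
  intro s _
  unfold Spec_validate_license_key
  have := (A_iff s).trans (B_iff s).symm
  exact Bool.eq_iff_iff.mpr this
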